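-- pv_equiv track=rewrite | github.com/Mercurykz/Barretao- | personal_ai_agent.py | _is_search_or_aggregator_domain
-- ===== SOURCE A (Python) =====
-- def _is_search_or_aggregator_domain(host: str) -> bool:
--     bad_domains = {
--         "startpage.com",
--         "google.com",
--         "bing.com",
--         "yahoo.com",
--         "search.brave.com",
--         "wikipedia.org",
--         "facebook.com",
--         "instagram.com",
--         "youtube.com",
--     }
--     host = host.lower().replace("www.", "")
--     return any(host == domain or host.endswith("." + domain) for domain in bad_domains)
-- ===== SOURCE B (Python) =====
-- def _is_search_or_aggregator_domain(host: str) -> bool: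
--     bad_domains = {
--         "startpage.com",
--         "google.com",
--         "bing.com",
--         "yahoo.com",
--         "search.brave.com",
--         "wikipedia.org",
--         "facebook.com",
--         "instagram.com",
--         "youtube.com",
--     }
--     host = host.lower().replace("www.", "")
--     parts = host.split(".")
--     return any(".".join(parts[i:]) in bad_domains for i in range(len(parts)))
-- ===== Notes on version B (the rewrite author's own statement) =====
-- stated objective: idiomatic
-- what changed: Instead of scanning all 9 bad domains and calling endswith on each, B enumerates the host's own dotted suffixes (split on '.') and tests each with a direct set-membership lookup.
import Mathlib
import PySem

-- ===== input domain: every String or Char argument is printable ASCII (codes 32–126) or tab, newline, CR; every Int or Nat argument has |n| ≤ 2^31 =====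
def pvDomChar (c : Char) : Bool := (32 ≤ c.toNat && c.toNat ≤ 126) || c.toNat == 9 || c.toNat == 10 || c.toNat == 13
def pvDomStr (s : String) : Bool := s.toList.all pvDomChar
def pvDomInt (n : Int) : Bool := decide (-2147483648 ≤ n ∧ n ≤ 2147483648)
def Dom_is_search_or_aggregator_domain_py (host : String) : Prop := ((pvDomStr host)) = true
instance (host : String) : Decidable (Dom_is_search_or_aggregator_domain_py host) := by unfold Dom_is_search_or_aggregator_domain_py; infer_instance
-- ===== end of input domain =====

-- B replaces A's scan over the 9 bad domains (endswith each) by enumerating the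
-- host's own dotted suffixes and looking each up in the set (more idiomatic).


-- ===== PORT A =====
-- the Python set literal bad_domains (all nine strings are distinct)
def pvBadDomains : PySem.Set (List Char) :=
  PySem.Set.ofList
    [ "startpage.com".toList, "google.com".toList, "bing.com".toList,
      "yahoo.com".toList, "search.brave.com".toList, "wikipedia.org".toList,
      "facebook.com".toList, "instagram.com".toList, "youtube.com".toList ]

def is_search_or_aggregator_domain_py (host : String) : Bool :=
  -- host = host.lower().replace("www.", "")
  let h := PySem.Chars.replace (PySem.Chars.lower host.toList) "www.".toList []
  -- any(host == domain or host.endswith("." + domain) for domain in bad_domains)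
  pvBadDomains.any (fun d => h == d || PySem.Chars.endswith h ('.' :: d))

-- ===== PORT B =====
def is_search_or_aggregator_domain_py_alt (host : String) : Bool :=
  -- host = host.lower().replace("www.", "")
  let h := PySem.Chars.replace (PySem.Chars.lower host.toList) "www.".toList []
  -- parts = host.split(".")
  let parts := PySem.Chars.splitOn h ".".toList
  -- any(".".join(parts[i:]) in bad_domains for i in range(len(parts)))
  -- (i runs over 0 .. len(parts)-1, so parts[i:] is List.drop i)
  (List.range parts.length).any
    (fun i => pvBadDomains.contains (PySem.Chars.join ['.'] (parts.drop i)))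

-- ===== PRECONDITION & SPEC =====
def Spec_is_search_or_aggregator_domain_py (host : String) (out : Bool) : Prop := out = is_search_or_aggregator_domain_py_alt host
instance (host : String) (out : Bool) : Decidable (Spec_is_search_or_aggregator_domain_py host out) := by unfold Spec_is_search_or_aggregator_domain_py; infer_instance

-- ===== CLAIM (what is proved, stated in full; the proofs are below) =====
def Claim_equal_is_search_or_aggregator_domain_py : Prop := ∀ (host : String), Dom_is_search_or_aggregator_domain_py host → Spec_is_search_or_aggregator_domain_py host (is_search_or_aggregator_domain_py host)

-- ===== LEMMAS AND PROOFS =====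

def pvG (cur l : List Char) : List (List Char) :=
  match l with
  | [] => [cur.reverse]
  | c :: rest => if c = '.' then cur.reverse :: pvG [] rest else pvG (c :: cur) rest

theorem pvGo_spec (fuel : Nat) (l cur : List Char) (acc : List (List Char))
    (h : l.length < fuel) :
    PySem.Chars.splitOn.go ['.'] fuel l cur acc = acc.reverse ++ pvG cur l := by
  induction fuel generalizing l cur acc with
  | zero => omega
  | succ n ih =>
    cases l with
    | nil => simp [PySem.Chars.splitOn.go, pvG]
    | cons c rest =>
      rw [PySem.Chars.splitOn.go]
      simp only [List.length_cons] at h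
      by_cases hc : c = '.'
      · subst hc
        rw [if_pos (by simp [List.isPrefixOf])]
        simp only [List.length_cons, List.length_nil, List.drop_succ_cons, List.drop_zero]
        rw [ih rest [] (cur.reverse :: acc) (by omega)]
        simp [pvG]
      · rw [if_neg (by simp [List.isPrefixOf, Ne.symm hc])]
        rw [ih rest (c :: cur) acc (by omega)]
        simp [pvG, hc]

theorem pvSplitOn_eq (cs : List Char) :
    PySem.Chars.splitOn cs ['.'] = pvG [] cs := by
  simpa using pvGo_spec (cs.length + 1) cs [] [] (by omega)

theorem pvG_modifyHead (l : List Char) (cur : List Char) :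
    pvG cur l = (pvG [] l).modifyHead (cur.reverse ++ ·) := by
  induction l generalizing cur with
  | nil => simp [pvG]
  | cons c rest ih =>
    by_cases hc : c = '.'
    · simp [pvG, hc]
    · simp only [pvG, if_neg hc]
      rw [ih (c :: cur), ih [c], List.modifyHead_modifyHead]
      congr 1
      funext x
      simp

theorem pvG_ne_nil (l : List Char) : pvG [] l ≠ [] := by
  induction l with
  | nil => simp [pvG]
  | cons c rest ih =>
    by_cases hc : c = '.'
    · simp [pvG, hc]
    · rw [pvG, if_neg hc, pvG_modifyHead]
      cases h : pvG [] rest with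
      | nil => exact absurd h ih
      | cons a t => simp

theorem pvIntercalate_cons₂ (sep x y : List Char) (ys : List (List Char)) :
    sep.intercalate (x :: y :: ys) = x ++ sep ++ sep.intercalate (y :: ys) := by
  simp [List.intercalate, List.intersperse]

theorem pvJoin_pvG (l : List Char) : PySem.Chars.join ['.'] (pvG [] l) = l := by
  induction l with
  | nil => decide
  | cons c rest ih =>
    by_cases hc : c = '.'
    · subst hc
      rw [pvG, if_pos rfl]
      cases h : pvG [] rest with
      | nil => exact absurd h (pvG_ne_nil rest)
      | cons a t =>
        rw [h] at ih
        simp only [PySem.Chars.join] at ih ⊢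
        rw [pvIntercalate_cons₂, ih]
        rfl
    · rw [pvG, if_neg hc, pvG_modifyHead]
      cases h : pvG [] rest with
      | nil => exact absurd h (pvG_ne_nil rest)
      | cons a t =>
        rw [h] at ih
        simp only [PySem.Chars.join] at ih ⊢
        cases t with
        | nil =>
          simp only [List.intercalate, List.intersperse, List.flatten] at ih ⊢
          simp_all
        | cons b t' =>
          rw [List.modifyHead_cons, pvIntercalate_cons₂]
          rw [pvIntercalate_cons₂] at ih
          simp only [List.reverse_singleton, List.cons_append]
          simp [ih]

def pvDsuf (l : List Char) : List (List Char) :=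
  match l with
  | [] => []
  | c :: rest => if c = '.' then rest :: pvDsuf rest else pvDsuf rest

theorem pvJoin_cons_head (c : Char) (x : List Char) (xs : List (List Char)) :
    PySem.Chars.join ['.'] ((c :: x) :: xs) = c :: PySem.Chars.join ['.'] (x :: xs) := by
  cases xs with
  | nil => simp [PySem.Chars.join, List.intercalate, List.intersperse]
  | cons b t =>
    simp only [PySem.Chars.join]
    rw [pvIntercalate_cons₂, pvIntercalate_cons₂]
    simp

theorem pvSuffJoins (cs : List Char) :
    (List.range (pvG [] cs).length).map
        (fun i => PySem.Chars.join ['.'] ((pvG [] cs).drop i))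
      = cs :: pvDsuf cs := by
  induction cs with
  | nil => decide
  | cons c rest ih =>
    cases h : pvG [] rest with
    | nil => exact absurd h (pvG_ne_nil rest)
    | cons a t =>
      have hjoin : PySem.Chars.join ['.'] (a :: t) = rest := by
        rw [← h, pvJoin_pvG]
      by_cases hc : c = '.'
      · subst hc
        rw [pvG, if_pos rfl, h]
        rw [List.length_cons, List.range_succ_eq_map, List.map_cons, List.map_map]
        rw [h] at ih
        simp only [List.drop_zero, Function.comp_def, List.drop_succ_cons] at ih ⊢
        rw [ih]
        have : PySem.Chars.join ['.'] ([] :: a :: t) = '.' :: rest := by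
          simp only [PySem.Chars.join] at hjoin ⊢
          rw [pvIntercalate_cons₂, hjoin]
          simp
        rw [show ([] : List Char).reverse = [] from rfl, this]
        simp [pvDsuf]
      · rw [show pvG [] (c :: rest) = (c :: a) :: t from by
          rw [pvG, if_neg hc, pvG_modifyHead, h]; simp]
        rw [h] at ih
        rw [List.length_cons, List.range_succ_eq_map, List.map_cons, List.map_map] at ih ⊢
        simp only [List.drop_zero, Function.comp_def, List.drop_succ_cons] at ih ⊢
        rw [List.cons.injEq] at ih
        rw [ih.2, pvJoin_cons_head, ih.1]
        simp [pvDsuf, hc]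

theorem pvMem_pvDsuf (d cs : List Char) : d ∈ pvDsuf cs ↔ ('.' :: d) <:+ cs := by
  induction cs with
  | nil => simp [pvDsuf]
  | cons c rest ih =>
    by_cases hc : c = '.'
    · subst hc
      rw [pvDsuf, if_pos rfl]
      rw [List.suffix_cons_iff, List.mem_cons, ih]
      simp
    · rw [pvDsuf, if_neg hc, ih, List.suffix_cons_iff]
      constructor
      · exact Or.inr
      · rintro (he | hs)
        · exact absurd (List.cons.injEq .. ▸ he).1.symm hc
        · exact hs

theorem pvMain (h : List Char) :
    pvBadDomains.any (fun d => h == d || PySem.Chars.endswith h ('.' :: d))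
      = (List.range (PySem.Chars.splitOn h ".".toList).length).any
          (fun i => pvBadDomains.contains
            (PySem.Chars.join ['.'] ((PySem.Chars.splitOn h ".".toList).drop i))) := by
  rw [show (".".toList : List Char) = ['.'] from rfl, pvSplitOn_eq]
  have hmap : ((List.range (pvG [] h).length).any
      (fun i => pvBadDomains.contains (PySem.Chars.join ['.'] ((pvG [] h).drop i))))
    = ((List.range (pvG [] h).length).map
        (fun i => PySem.Chars.join ['.'] ((pvG [] h).drop i))).any
        (fun t => pvBadDomains.contains t) := List.any_map.symm
  rw [hmap]
  rw [pvSuffJoins]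
  rw [Bool.eq_iff_iff]
  simp only [List.any_eq_true, List.mem_cons, Bool.or_eq_true,
    beq_iff_eq, PySem.Chars.endswith, List.isSuffixOf_iff_suffix,
    pvMem_pvDsuf]
  constructor
  · rintro ⟨d, hd, he | hs⟩
    · exact ⟨d, Or.inl he.symm, (List.contains_iff_mem).mpr hd⟩
    · exact ⟨d, Or.inr hs, (List.contains_iff_mem).mpr hd⟩
  · rintro ⟨t, ht | hs, hb⟩
    · exact ⟨t, (List.contains_iff_mem).mp hb, Or.inl ht.symm⟩
    · exact ⟨t, (List.contains_iff_mem).mp hb, Or.inr hs⟩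

-- ===== VERDICT (by name: the statement is the Claim_ definition above) =====
theorem is_search_or_aggregator_domain_py_spec : Claim_equal_is_search_or_aggregator_domain_py := by
  intro host _
  unfold Spec_is_search_or_aggregator_domain_py
  unfold is_search_or_aggregator_domain_py is_search_or_aggregator_domain_py_alt
  exact pvMain _
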